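-- pv_equiv track=rewrite | github.com/PatrickHechler/Advent-of-Code-2024-exchange | exchange/day07/matthias/day07.py | calc_val_1
-- ===== SOURCE A (Python) =====
-- from typing import Callable, Generator, Sequence
--
-- def calc_val_1(num_seq: Sequence[int]) -> Generator[int, None, None]:
--     """Werteliste für Teilaufgabe 1 erzeugen
--
--     Args:
--         num_seq: Folge der Zahlen, zwischen denen die Operatoren einzusetzen sind
--
--     Yields:
--         Die sich durch Einfügen von + und * ergebenden Werte
--     """
--     val_last = num_seq[-1]
--
--     if len(num_seq) == 1:
--         yield val_last
--     else:
--         for val_left in calc_val_1(num_seq[:-1]):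
--             yield val_left + val_last  # operator +
--             yield val_left * val_last  # operator *
-- ===== SOURCE B (Python) =====
-- def calc_val_1(num_seq):
--     vals = [num_seq[0]]
--     for num in num_seq[1:]:
--         new_vals = []
--         for v in vals:
--             new_vals.append(v + num)
--             new_vals.append(v * num)
--         vals = new_vals
--     yield from vals
-- ===== Notes on version B (the rewrite author's own statement) =====
-- stated objective: alternative
-- what changed: Replaces the right-to-left recursion over num_seq[:-1] (with repeated slicing and generator nesting) by a single left-to-right iterative pass that rebuilds the value list once per number, preserving the exact emission order.
import Mathlib
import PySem

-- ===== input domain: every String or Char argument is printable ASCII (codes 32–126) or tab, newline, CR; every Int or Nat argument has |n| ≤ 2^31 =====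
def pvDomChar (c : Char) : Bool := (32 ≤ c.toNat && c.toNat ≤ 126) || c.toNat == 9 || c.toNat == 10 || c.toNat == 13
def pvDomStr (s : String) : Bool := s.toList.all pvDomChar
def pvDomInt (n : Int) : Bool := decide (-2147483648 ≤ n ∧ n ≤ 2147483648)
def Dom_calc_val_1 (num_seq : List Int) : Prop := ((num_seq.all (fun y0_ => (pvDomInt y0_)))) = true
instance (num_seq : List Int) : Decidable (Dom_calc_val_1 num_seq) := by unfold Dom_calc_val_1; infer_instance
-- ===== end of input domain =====

-- ===== PORT A =====
-- B re-implements A's right-to-left recursion as one left-to-right iterative pass (same emission order).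
def calc_val_1 (num_seq : List Int) : List Int :=
  let val_last := (PySem.List.pyGet? num_seq (-1)).getD 0  -- num_seq[-1]; none (IndexError on []) excluded by Pre_
  if num_seq.length = 1 then [val_last]
  else if h : num_seq = [] then []  -- unreachable under Pre_ (A raises IndexError above on [])
  else (calc_val_1 (PySem.List.slice num_seq none (some (-1)))).flatMap
         (fun val_left => [val_left + val_last, val_left * val_last])
termination_by num_seq.length
decreasing_by
  rw [PySem.List.slice_to_neg_one]
  have : num_seq.length ≠ 0 := fun hl => h (List.eq_nil_of_length_eq_zero hl)
  simp [List.length_dropLast]; omega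

-- ===== PORT B =====
def calc_val_1_alt (num_seq : List Int) : List Int :=
  match num_seq with
  | [] => []  -- B raises IndexError at num_seq[0]; excluded by Pre_
  | x :: _ =>
    (PySem.List.slice num_seq (some 1) none).foldl
      (fun vals num => vals.foldl (fun new_vals v => new_vals ++ [v + num, v * num]) []) [x]

-- ===== PRECONDITION & SPEC =====
-- A (and B) raise IndexError on the empty sequence; excluded.
def Pre_calc_val_1 (num_seq : List Int) : Prop := num_seq ≠ []
instance (num_seq : List Int) : Decidable (Pre_calc_val_1 num_seq) := by unfold Pre_calc_val_1; infer_instance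
def pvWitness_calc_val_1 : List Int := [2, 3, 4]
def Spec_calc_val_1 (num_seq : List Int) (out : List Int) : Prop := out = calc_val_1_alt num_seq
instance (num_seq : List Int) (out : List Int) : Decidable (Spec_calc_val_1 num_seq out) := by unfold Spec_calc_val_1; infer_instance

-- ===== CLAIM (what is proved, stated in full; the proofs are below) =====
def Claim_equal_calc_val_1 : Prop := ∀ (num_seq : List Int), Dom_calc_val_1 num_seq → Pre_calc_val_1 num_seq → Spec_calc_val_1 num_seq (calc_val_1 num_seq)

-- ===== LEMMAS AND PROOFS =====

-- A on a singleton
theorem calcA_singleton (x : Int) : calc_val_1 [x] = [x] := by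
  unfold calc_val_1; simp [PySem.List.pyGet?_neg_one]

-- A peels the last element
theorem calcA_snoc (xs : List Int) (n : Int) (h : xs ≠ []) :
    calc_val_1 (xs ++ [n]) = (calc_val_1 xs).flatMap (fun v => [v + n, v * n]) := by
  rw [calc_val_1]
  have hlen : (xs ++ [n]).length ≠ 1 := by
    simp only [List.length_append, List.length_singleton]
    have : xs.length ≠ 0 := fun hl => h (List.eq_nil_of_length_eq_zero hl)
    omega
  have hne : xs ++ [n] ≠ [] := by simp
  rw [if_neg hlen, dif_neg hne, PySem.List.slice_to_neg_one, List.dropLast_concat]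
  simp [PySem.List.pyGet?_neg_one_append_singleton]

-- B's inner loop builds the flatMap
theorem inner_foldl (vals : List Int) (n : Int) :
    vals.foldl (fun new_vals v => new_vals ++ [v + n, v * n]) [] =
      vals.flatMap (fun v => [v + n, v * n]) := by
  simpa using PySem.List.foldl_append_eq_flatMap (fun v => [v + n, v * n]) vals []

-- main equivalence on nonempty lists, by induction on the tail from the right
theorem calc_eq_fold (x : Int) (rest : List Int) :
    calc_val_1 (x :: rest) = rest.foldl (fun vals n => vals.flatMap (fun v => [v + n, v * n])) [x] := by
  induction rest using List.reverseRecOn with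
  | nil => simpa using calcA_singleton x
  | append_singleton rest' n ih =>
      have : x :: (rest' ++ [n]) = (x :: rest') ++ [n] := by simp
      rw [this, calcA_snoc _ _ (by simp), ih, List.foldl_append]
      simp

-- ===== VERDICT (by name: the statement is the Claim_ definition above) =====
theorem calc_val_1_spec : Claim_equal_calc_val_1 := by
  intro num_seq _ hpre
  unfold Spec_calc_val_1 calc_val_1_alt
  match num_seq, hpre with
  | x :: rest, _ =>
    rw [PySem.List.slice_from_one]
    simp only [List.tail_cons]
    rw [calc_eq_fold]
    congr 1
    funext vals n
    exact (inner_foldl vals n).symm
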